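-- pv_equiv track=rewrite | github.com/RTLucassen/spitz_classification | simulation_experiment/simulation.py | sequential
-- ===== SOURCE A (Python) =====
-- IHC_DAYS = 1
--
-- ARCHER_DAYS = 10
--
-- def sequential(
--     y_true: list[int],
--     y_pred: list[float],
--     false_negative: bool,
--     IHCs: list[str] = ['IHC NTRK', 'IHC ROS1', 'IHC ALK'],
-- ) -> list[str]:
--     """
--     """
--     tests = []
--     days = 0
--     exams = 1
--     for test in IHCs:
--         tests.append(test)
--         days += IHC_DAYS
--         exams += 1
--         if mapping(y_true) in test and not false_negative:
--             return tests, days, exams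
--
--     tests.append('ARCHER')
--     days += ARCHER_DAYS
--     exams += 1
--
--     return tests, days, exams
--
-- def mapping(y_true):
--     if y_true[0] == 1:
--         return 'ALK'
--     elif y_true[1] == 1:
--         return 'ROS1'
--     elif y_true[2] == 1:
--         return 'NTRK'
--     elif y_true[3] == 1:
--         return 'OTHER'
--     else:
--         raise ValueError
-- ===== SOURCE B (Python) =====
-- IHC_DAYS = 1
--
-- ARCHER_DAYS = 10
--
-- def sequential(
--     y_true: list[int],
--     y_pred: list[float],
--     false_negative: bool,
--     IHCs: list[str] = ['IHC NTRK', 'IHC ROS1', 'IHC ALK'],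
-- ) -> list[str]:
--     if IHCs:
--         label = _label(y_true)
--         if not false_negative:
--             hit = next((i for i, test in enumerate(IHCs) if label in test), None)
--             if hit is not None:
--                 return IHCs[:hit + 1], (hit + 1) * IHC_DAYS, hit + 2
--     return list(IHCs) + ['ARCHER'], len(IHCs) * IHC_DAYS + ARCHER_DAYS, len(IHCs) + 2
--
-- def _label(y_true):
--     for i, name in enumerate(['ALK', 'ROS1', 'NTRK', 'OTHER']):
--         if y_true[i] == 1:
--             return name
--     raise ValueError
-- ===== Notes on version B (the rewrite author's own statement) =====
-- stated objective: simpler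
-- what changed: Replaces the incremental append/accumulate loop with a single first-match index scan plus closed-form slice/arithmetic for tests, days and exams, and restates mapping as a table walk; the label is computed once instead of on every iteration.
import Mathlib
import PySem

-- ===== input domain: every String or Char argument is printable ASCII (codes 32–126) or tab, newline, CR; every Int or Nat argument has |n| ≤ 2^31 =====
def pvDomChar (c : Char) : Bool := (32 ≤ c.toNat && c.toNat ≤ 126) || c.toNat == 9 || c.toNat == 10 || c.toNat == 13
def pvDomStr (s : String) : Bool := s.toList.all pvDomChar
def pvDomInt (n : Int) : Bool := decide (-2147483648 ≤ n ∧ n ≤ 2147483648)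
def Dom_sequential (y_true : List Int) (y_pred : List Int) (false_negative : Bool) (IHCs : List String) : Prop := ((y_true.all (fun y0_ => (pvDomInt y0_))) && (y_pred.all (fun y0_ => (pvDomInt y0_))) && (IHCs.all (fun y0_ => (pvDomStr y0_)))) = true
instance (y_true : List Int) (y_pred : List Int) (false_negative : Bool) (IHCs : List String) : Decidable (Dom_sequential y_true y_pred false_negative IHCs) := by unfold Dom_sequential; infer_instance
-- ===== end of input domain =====

-- B replaces A's incremental append/accumulate loop by a single first-match index scan
-- plus closed-form slice/arithmetic, and restates `mapping` as a table walk (objective: simpler).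

-- ===== PORT A =====
-- mapping(y_true): none = the Python raises (IndexError or ValueError)
def mappingA (y : List Int) : Option String :=
  match PySem.List.pyGet? y 0 with
  | none => none
  | some v0 =>
    if v0 = 1 then some "ALK" else
    match PySem.List.pyGet? y 1 with
    | none => none
    | some v1 =>
      if v1 = 1 then some "ROS1" else
      match PySem.List.pyGet? y 2 with
      | none => none
      | some v2 =>
        if v2 = 1 then some "NTRK" else
        match PySem.List.pyGet? y 3 with
        | none => none
        | some v3 =>
          if v3 = 1 then some "OTHER" else none

-- the for-loop of A, carrying tests/days/exams; none = mapping raised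
def seqLoopA (y : List Int) (fn : Bool) : List String → List String → Int → Int → Option (List String × Int × Int)
  | [], tests, days, exams => some (tests ++ ["ARCHER"], days + 10, exams + 1)
  | test :: rest, tests, days, exams =>
    let tests := tests ++ [test]
    let days := days + 1
    let exams := exams + 1
    match mappingA y with
    | none => none
    | some lbl =>
      if (PySem.Str.isIn lbl test && !fn) = true then some (tests, days, exams)
      else seqLoopA y fn rest tests days exams

def sequential (y_true : List Int) (y_pred : List Int) (false_negative : Bool) (IHCs : List String) : List String × Int × Int :=
  (seqLoopA y_true false_negative IHCs [] 0 1).getD ([], 0, 0)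

-- ===== PORT B =====
def labelTable : List (Nat × String) := [(0, "ALK"), (1, "ROS1"), (2, "NTRK"), (3, "OTHER")]

-- _label(y_true): walk the (index, name) table; none = the Python raises
def labelGo (y : List Int) : List (Nat × String) → Option String
  | [] => none
  | (i, n) :: rest =>
    match PySem.List.pyGet? y (i : Int) with
    | none => none
    | some v => if v = 1 then some n else labelGo y rest

def sequential_alt (y_true : List Int) (y_pred : List Int) (false_negative : Bool) (IHCs : List String) : List String × Int × Int :=
  let fallback : List String × Int × Int :=
    (IHCs ++ ["ARCHER"], (IHCs.length : Int) * 1 + 10, (IHCs.length : Int) + 2)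
  if IHCs = [] then fallback
  else
    match labelGo y_true labelTable with
    | none => ([], 0, 0)  -- the Python raises here
    | some label =>
      if false_negative = false then
        match IHCs.findIdx? (fun test => PySem.Str.isIn label test) with
        | some i => (IHCs.take (i + 1), ((i : Int) + 1) * 1, (i : Int) + 2)
        | none => fallback
      else fallback

-- ===== PRECONDITION & SPEC =====
-- Pre_ excludes exactly the inputs where A raises: IHCs non-empty and mapping(y_true)
-- fails (IndexError: fewer than the needed entries, or ValueError: no 1 among the first four).
def Pre_sequential (y_true : List Int) (y_pred : List Int) (false_negative : Bool) (IHCs : List String) : Prop :=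
  IHCs = [] ∨ (y_true.take 4).any (fun v => v == 1) = true
instance (y_true : List Int) (y_pred : List Int) (false_negative : Bool) (IHCs : List String) : Decidable (Pre_sequential y_true y_pred false_negative IHCs) := by unfold Pre_sequential; infer_instance

def pvWitness_sequential : List Int × List Int × Bool × List String :=
  ([0, 1, 0, 0], [1], false, ["IHC NTRK", "IHC ROS1", "IHC ALK"])

def Spec_sequential (y_true : List Int) (y_pred : List Int) (false_negative : Bool) (IHCs : List String) (out : List String × Int × Int) : Prop := out = sequential_alt y_true y_pred false_negative IHCs
instance (y_true : List Int) (y_pred : List Int) (false_negative : Bool) (IHCs : List String) (out : List String × Int × Int) : Decidable (Spec_sequential y_true y_pred false_negative IHCs out) := by unfold Spec_sequential; infer_instance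

-- ===== CLAIM (what is proved, stated in full; the proofs are below) =====
def Claim_equal_sequential : Prop := ∀ (y_true : List Int) (y_pred : List Int) (false_negative : Bool) (IHCs : List String), Dom_sequential y_true y_pred false_negative IHCs → Pre_sequential y_true y_pred false_negative IHCs → Spec_sequential y_true y_pred false_negative IHCs (sequential y_true y_pred false_negative IHCs)

-- ===== LEMMAS AND PROOFS =====
theorem mappingA_eq_labelGo (y : List Int) : mappingA y = labelGo y labelTable := by
  simp only [mappingA, labelGo, labelTable, Nat.cast_ofNat, Nat.cast_one, Nat.cast_zero]

theorem mappingA_isSome (y : List Int) (h : (y.take 4).any (fun v => v == 1) = true) :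
    ∃ l, mappingA y = some l := by
  rcases y with _ | ⟨a, _ | ⟨b, _ | ⟨c, _ | ⟨d, t⟩⟩⟩⟩ <;> simp at h <;>
    simp only [mappingA,
      (by norm_num : (0 : Int) = ((0 : Nat) : Int)),
      (by norm_num : (1 : Int) = ((1 : Nat) : Int)),
      (by norm_num : (2 : Int) = ((2 : Nat) : Int)),
      (by norm_num : (3 : Int) = ((3 : Nat) : Int)),
      PySem.List.pyGet?_natCast, List.getElem?_cons_zero, List.getElem?_cons_succ,
      List.getElem?_nil] <;>
    split_ifs <;> simp_all

theorem seqLoopA_eq (y : List Int) (lbl : String) (h : mappingA y = some lbl) (fn : Bool)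
    (rest tests : List String) (days exams : Int) :
    seqLoopA y fn rest tests days exams =
      some (match (if fn then none else rest.findIdx? (fun t => PySem.Str.isIn lbl t)) with
        | some i => (tests ++ rest.take (i + 1), days + ((i : Int) + 1), exams + ((i : Int) + 1))
        | none => (tests ++ rest ++ ["ARCHER"], days + (rest.length : Int) + 10,
                   exams + (rest.length : Int) + 1)) := by
  induction rest generalizing tests days exams with
  | nil =>
    cases fn <;> simp [seqLoopA] <;> refine ⟨rfl, by ring, by ring⟩
  | cons t ts ih =>
    simp only [seqLoopA, h]
    cases fn with
    | true =>
      rw [if_neg (by simp : ¬ ((PySem.Str.isIn lbl t && !true) = true)), ih]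
      simp only [if_true, List.length_cons, Option.some.injEq, Prod.mk.injEq]
      refine ⟨by simp, by push_cast; ring, by push_cast; ring⟩
    | false =>
      by_cases hin : PySem.Str.isIn lbl t = true
      · rw [if_pos (by rw [hin]; rfl)]
        simp only [List.findIdx?_cons, Bool.false_eq_true, if_false, hin, if_true,
          Option.some.injEq, Prod.mk.injEq, List.take_succ_cons, List.take_zero]
        refine ⟨by simp, by push_cast; ring, by push_cast; ring⟩
      · rw [Bool.not_eq_true] at hin
        rw [if_neg (by rw [hin]; exact Bool.false_ne_true), ih]
        simp only [List.findIdx?_cons, Bool.false_eq_true, if_false, hin]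
        cases hfi : ts.findIdx? (fun t => PySem.Str.isIn lbl t) with
        | none =>
          simp only [hfi, Option.map_none, List.length_cons, Option.some.injEq, Prod.mk.injEq]
          refine ⟨by simp, by push_cast; ring, by push_cast; ring⟩
        | some i =>
          simp only [hfi, Option.map_some, Option.some.injEq, Prod.mk.injEq]
          refine ⟨by simp [List.take_succ_cons], by push_cast; ring, by push_cast; ring⟩

-- ===== VERDICT (by name: the statement is the Claim_ definition above) =====
theorem sequential_spec : Claim_equal_sequential := by
  intro y_true y_pred fn IHCs _hdom hpre
  unfold Spec_sequential sequential sequential_alt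
  rcases eq_or_ne IHCs [] with hE | hNE
  · subst hE
    simp [seqLoopA]
  · rcases hpre with hE | hany
    · exact absurd hE hNE
    obtain ⟨lbl, hlbl⟩ := mappingA_isSome y_true hany
    rw [seqLoopA_eq y_true lbl hlbl fn IHCs [] 0 1, ← mappingA_eq_labelGo, hlbl,
      if_neg hNE]
    cases fn with
    | true =>
      simp only [if_true, if_neg (by simp : ¬ (true = false)), Option.getD_some, Prod.mk.injEq]
      refine ⟨by simp, by push_cast; ring, by push_cast; ring⟩
    | false =>
      simp only [if_neg (by simp : ¬ (false = true)), if_pos rfl]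
      cases hfi : IHCs.findIdx? (fun t => PySem.Str.isIn lbl t) with
      | none =>
        rw [if_pos trivial]
        refine Prod.ext (by simp) (Prod.ext (by simp; try ring) (by simp; try ring))
      | some i =>
        rw [if_pos trivial]
        refine Prod.ext (by simp) (Prod.ext (by simp; try ring) (by simp; try ring))
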